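-- pv_equiv track=rewrite | github.com/cenkbircanoglu/cracking-the-coding-interview | chapter16/16.21.sum_swap.py | sum_swap
-- ===== SOURCE A (Python) =====
-- def sum_swap(nums1, nums2):
--     sum1 = sum(nums1)
--     sum2 = sum(nums2)
--
--     diff = sum1 - sum2
--     if diff % 2 != 0:
--         return None
--     target_diff = diff // 2
--     nums2_set = set(nums2)
--
--     for num1 in nums1:
--         b = num1 - target_diff
--         if b in nums2_set:
--             return [num1, b]
--
--     return None
-- ===== SOURCE B (Python) =====
-- def sum_swap(nums1, nums2):
--     sum1 = sum(nums1)
--     sum2 = sum(nums2)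
--     diff = sum1 - sum2
--     for num1 in nums1:
--         for num2 in nums2:
--             if 2 * (num1 - num2) == diff:
--                 return [num1, num2]
--     return None
-- ===== Notes on version B (the rewrite author's own statement) =====
-- stated objective: simpler
-- what changed: Replaced the parity check, floor-division target and set construction by a plain nested loop that returns the first pair with 2*(num1-num2) == sum1-sum2; odd differences are rejected automatically by the parity of 2*(...).
import Mathlib
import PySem

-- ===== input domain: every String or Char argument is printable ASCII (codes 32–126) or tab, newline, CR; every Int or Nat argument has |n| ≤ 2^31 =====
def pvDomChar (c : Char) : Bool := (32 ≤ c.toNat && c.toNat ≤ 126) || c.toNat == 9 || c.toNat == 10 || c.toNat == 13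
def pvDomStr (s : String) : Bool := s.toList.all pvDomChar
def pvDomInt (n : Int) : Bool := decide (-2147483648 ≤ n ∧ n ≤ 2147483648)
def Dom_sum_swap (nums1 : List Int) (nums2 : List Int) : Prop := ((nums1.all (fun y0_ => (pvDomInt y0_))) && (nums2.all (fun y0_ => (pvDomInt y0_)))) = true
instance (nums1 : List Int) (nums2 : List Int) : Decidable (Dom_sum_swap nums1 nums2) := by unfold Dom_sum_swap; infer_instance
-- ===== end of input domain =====

-- B replaces A's parity check, floor-division target and set by one nested loop testing 2*(num1-num2) == diff.

-- ===== PORT A =====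
-- 'for num1 in nums1: b = num1 - target_diff; if b in nums2_set: return [num1, b]'
def sumSwapLoopA (target : Int) (s : PySem.Set Int) : List Int → Option (List Int)
  | [] => none
  | num1 :: rest =>
    let b := num1 - target
    if PySem.Set.contains s b then some [num1, b] else sumSwapLoopA target s rest

def sum_swap (nums1 : List Int) (nums2 : List Int) : Option (List Int) :=
  let sum1 := nums1.sum
  let sum2 := nums2.sum
  let diff := sum1 - sum2
  if PySem.Int.mod diff 2 ≠ 0 then none
  else
    let target_diff := PySem.Int.floordiv diff 2
    let nums2_set := PySem.Set.ofList nums2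
    sumSwapLoopA target_diff nums2_set nums1

-- ===== PORT B =====
-- inner loop: 'for num2 in nums2: if 2*(num1-num2) == diff: return [num1, num2]'
def sumSwapInnerB (diff num1 : Int) : List Int → Option (List Int)
  | [] => none
  | num2 :: rest =>
    if 2 * (num1 - num2) = diff then some [num1, num2] else sumSwapInnerB diff num1 rest

-- outer loop over nums1
def sumSwapOuterB (diff : Int) (nums2 : List Int) : List Int → Option (List Int)
  | [] => none
  | num1 :: rest =>
    match sumSwapInnerB diff num1 nums2 with
    | some r => some r
    | none => sumSwapOuterB diff nums2 rest

def sum_swap_alt (nums1 : List Int) (nums2 : List Int) : Option (List Int) :=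
  let sum1 := nums1.sum
  let sum2 := nums2.sum
  let diff := sum1 - sum2
  sumSwapOuterB diff nums2 nums1

-- ===== PRECONDITION & SPEC =====
def Spec_sum_swap (nums1 : List Int) (nums2 : List Int) (out : Option (List Int)) : Prop := out = sum_swap_alt nums1 nums2
instance (nums1 : List Int) (nums2 : List Int) (out : Option (List Int)) : Decidable (Spec_sum_swap nums1 nums2 out) := by unfold Spec_sum_swap; infer_instance

-- ===== CLAIM (what is proved, stated in full; the proofs are below) =====
def Claim_equal_sum_swap : Prop := ∀ (nums1 : List Int) (nums2 : List Int), Dom_sum_swap nums1 nums2 → Spec_sum_swap nums1 nums2 (sum_swap nums1 nums2)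

-- ===== LEMMAS AND PROOFS =====

-- odd diff: the inner test 2*(num1-num2) == diff can never fire
theorem innerB_odd (diff num1 : Int) (h : diff % 2 ≠ 0) (l : List Int) :
    sumSwapInnerB diff num1 l = none := by
  induction l with
  | nil => rfl
  | cons n2 rest ih =>
    simp only [sumSwapInnerB]
    rw [if_neg (by omega), ih]

theorem outerB_odd (diff : Int) (h : diff % 2 ≠ 0) (nums2 l : List Int) :
    sumSwapOuterB diff nums2 l = none := by
  induction l with
  | nil => rfl
  | cons n1 rest ih =>
    simp only [sumSwapOuterB, innerB_odd diff n1 h nums2, ih]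

-- even diff = 2*t: the inner loop is exactly the membership test of num1 - t
theorem innerB_even (t num1 : Int) (l : List Int) :
    sumSwapInnerB (2 * t) num1 l =
      if (num1 - t) ∈ l then some [num1, num1 - t] else none := by
  induction l with
  | nil => rfl
  | cons n2 rest ih =>
    simp only [sumSwapInnerB, ih, List.mem_cons]
    by_cases h : n2 = num1 - t
    · subst h
      rw [if_pos (by ring), if_pos (Or.inl rfl)]
    · rw [if_neg (by omega)]
      by_cases h2 : (num1 - t) ∈ rest
      · rw [if_pos h2, if_pos (Or.inr h2)]
      · rw [if_neg h2, if_neg (by tauto)]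

theorem loops_even (t : Int) (nums2 l : List Int) :
    sumSwapLoopA t (PySem.Set.ofList nums2) l = sumSwapOuterB (2 * t) nums2 l := by
  induction l with
  | nil => rfl
  | cons num1 rest ih =>
    simp only [sumSwapLoopA, sumSwapOuterB, innerB_even]
    by_cases h : (num1 - t) ∈ nums2
    · rw [if_pos h]
      rw [if_pos ((PySem.Set.contains_iff _ _).mpr ((PySem.Set.mem_ofList _ _).mpr h))]
    · rw [if_neg h]
      rw [if_neg (by
        intro hc
        exact h ((PySem.Set.mem_ofList _ _).mp ((PySem.Set.contains_iff _ _).mp hc))), ih]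

-- ===== VERDICT (by name: the statement is the Claim_ definition above) =====
theorem sum_swap_spec : Claim_equal_sum_swap := by
  intro nums1 nums2 _
  unfold Spec_sum_swap sum_swap sum_swap_alt
  set diff := nums1.sum - nums2.sum with hdiff
  by_cases h : PySem.Int.mod diff 2 = 0
  · rw [if_neg (by simpa using h)]
    have hm : diff % 2 = 0 := by
      rwa [PySem.Int.mod_eq_emod_of_pos (by norm_num)] at h
    have hfd : PySem.Int.floordiv diff 2 = diff / 2 :=
      PySem.Int.floordiv_eq_ediv_of_pos (by norm_num)
    have h2 : 2 * (diff / 2) = diff := by omega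
    have := loops_even (diff / 2) nums2 nums1
    rw [h2] at this
    rw [hfd]
    exact this
  · rw [if_pos (by simpa using h)]
    have hm : diff % 2 ≠ 0 := by
      rwa [PySem.Int.mod_eq_emod_of_pos (by norm_num)] at h
    rw [outerB_odd diff hm]
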